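-- pv_equiv track=rewrite | github.com/konicaRu/python_study1 | SynchronizingTables.py | SynchronizingTables
-- ===== SOURCE A (Python) =====
-- def SynchronizingTables(N, ids, salary):
--     ids_sort = sorted(ids)
--     salary_sort = sorted(salary)
--     ids_sal = dict(zip(ids_sort, salary_sort))
--     salary_fin = []
--     for i in ids:
--         salary_fin.append(ids_sal[i])
--     return salary_fin
-- ===== SOURCE B (Python) =====
-- def SynchronizingTables(N, ids, salary):
--     # rank-by-counting: each id's output salary is the (number of ids <= it)-th
--     # smallest salary; ids are never sorted and no dict/binary search is used.
--     salary_sort = sorted(salary)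
--     out = []
--     for i in ids:
--         rank = 0
--         for j in ids:
--             if j <= i:
--                 rank += 1
--         out.append(salary_sort[rank - 1])
--     return out
-- ===== Notes on version B (the rewrite author's own statement) =====
-- stated objective: alternative
-- what changed: Drops both the sort of ids and the zip-dict: each id's rank is computed directly by counting how many ids are <= it (a quadratic counting pass), and that rank indexes the sorted salaries; correct because the dict maps each id to the salary at its last position in sorted order, which equals count(ids <= id) - 1.
-- outside the precondition, e.g. on SynchronizingTables(1, [1, 1], [5]): A returns [5, 5], B raises IndexError
import Mathlib
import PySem

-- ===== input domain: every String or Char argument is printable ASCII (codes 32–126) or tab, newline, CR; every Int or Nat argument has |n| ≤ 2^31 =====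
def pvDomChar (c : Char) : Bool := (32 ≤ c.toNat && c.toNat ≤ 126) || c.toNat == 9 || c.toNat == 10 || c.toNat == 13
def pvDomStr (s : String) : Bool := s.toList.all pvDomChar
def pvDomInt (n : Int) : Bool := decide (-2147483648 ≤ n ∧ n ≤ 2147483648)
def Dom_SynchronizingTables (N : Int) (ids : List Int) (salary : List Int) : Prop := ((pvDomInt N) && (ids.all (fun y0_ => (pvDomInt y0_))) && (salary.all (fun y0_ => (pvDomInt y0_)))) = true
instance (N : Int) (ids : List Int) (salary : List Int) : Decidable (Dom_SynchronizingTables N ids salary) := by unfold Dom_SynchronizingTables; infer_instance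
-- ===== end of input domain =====

-- B drops A's sort of ids and its zip-dict: each id's rank is counted directly (ids never sorted);
-- quadratic instead of A's sort-based pipeline — an alternative decomposition, not claimed faster.

-- ===== PORT A =====
def SynchronizingTables (N : Int) (ids : List Int) (salary : List Int) : List Int :=
  let ids_sort := PySem.List.sorted ids (fun x => x) false
  let salary_sort := PySem.List.sorted salary (fun x => x) false
  -- dict(zip(ids_sort, salary_sort)): fold the pairs into a dict, later insertions overwrite
  let ids_sal := (ids_sort.zip salary_sort).foldl (fun d p => d.insert p.1 p.2) PySem.Dict.empty
  -- for i in ids: salary_fin.append(ids_sal[i]); lookup always succeeds under Pre_ (KeyError excluded)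
  ids.foldl (fun acc i => acc ++ [ids_sal.getD i 0]) []

-- ===== PORT B =====
def SynchronizingTables_alt (N : Int) (ids : List Int) (salary : List Int) : List Int :=
  let salary_sort := PySem.List.sorted salary (fun x => x) false
  -- for i in ids: rank = count of j in ids with j <= i; append salary_sort[rank - 1]
  ids.foldl (fun out i =>
    let rank : Int := ids.foldl (fun r j => if j ≤ i then r + 1 else r) 0
    out ++ [PySem.List.pyGetD salary_sort (rank - 1) 0]) []

-- ===== PRECONDITION & SPEC =====
-- Pre_ excludes inputs with more ids than salaries, where zip silently truncates the dict: A then raises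
-- KeyError on most of them, and on the rest (all ids collapsing into the truncated keys) A returns an
-- accidental truncation-dependent value while B's rank index raises IndexError.
def Pre_SynchronizingTables (N : Int) (ids : List Int) (salary : List Int) : Prop :=
  ids.length ≤ salary.length
instance (N : Int) (ids : List Int) (salary : List Int) : Decidable (Pre_SynchronizingTables N ids salary) := by unfold Pre_SynchronizingTables; infer_instance
def pvWitness_SynchronizingTables : Int × List Int × List Int := (3, [2, 1, 2], [10, 20, 30])

def Spec_SynchronizingTables (N : Int) (ids : List Int) (salary : List Int) (out : List Int) : Prop := out = SynchronizingTables_alt N ids salary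
instance (N : Int) (ids : List Int) (salary : List Int) (out : List Int) : Decidable (Spec_SynchronizingTables N ids salary out) := by unfold Spec_SynchronizingTables; infer_instance

-- ===== CLAIM (what is proved, stated in full; the proofs are below) =====
def Claim_equal_SynchronizingTables : Prop := ∀ (N : Int) (ids : List Int) (salary : List Int), Dom_SynchronizingTables N ids salary → Pre_SynchronizingTables N ids salary → Spec_SynchronizingTables N ids salary (SynchronizingTables N ids salary)

-- ===== LEMMAS AND PROOFS =====

-- a fold of inserts whose pairs never carry key k leaves getD k unchanged
lemma foldl_insert_getD_of_forall_ne (l : List (Int × Int)) (d : PySem.Dict Int Int) (k v0 : Int)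
    (h : ∀ p ∈ l, p.1 ≠ k) :
    (l.foldl (fun d p => d.insert p.1 p.2) d).getD k v0 = d.getD k v0 := by
  induction l generalizing d with
  | nil => rfl
  | cons p rest ih =>
    simp only [List.foldl_cons]
    rw [ih _ (fun q hq => h q (List.mem_cons_of_mem _ hq)),
        PySem.Dict.getD_insert,
        if_neg (fun he => h p List.mem_cons_self he.symm)]

-- the dict built by folding inserts returns the value of the LAST pair carrying key k
lemma foldl_insert_getD_last (l : List (Int × Int)) (d : PySem.Dict Int Int) (k v0 : Int)
    (j : Nat) (hj : j < l.length) (hkey : (l[j]).1 = k)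
    (hafter : ∀ m (hm : m < l.length), j < m → (l[m]).1 ≠ k) :
    (l.foldl (fun d p => d.insert p.1 p.2) d).getD k v0 = (l[j]).2 := by
  induction l generalizing d j with
  | nil => simp at hj
  | cons p rest ih =>
    simp only [List.foldl_cons]
    cases j with
    | zero =>
      simp only [List.getElem_cons_zero] at hkey ⊢
      rw [foldl_insert_getD_of_forall_ne]
      · rw [PySem.Dict.getD_insert, hkey]; simp
      · intro q hq
        obtain ⟨m, hm, rfl⟩ := List.mem_iff_getElem.mp hq
        have := hafter (m + 1) (by simpa using hm) (Nat.succ_pos m)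
        simpa using this
    | succ j' =>
      have hj' : j' < rest.length := by simpa using hj
      exact ih _ j' hj' (by simpa using hkey)
        (fun m hm hlt => by
          have := hafter (m + 1) (by simpa using hm) (by omega)
          simpa using this)

-- on a list whose ≤-i elements are exactly the first r positions, countP (≤ i) is r
lemma countP_eq_of_prefix (s : List Int) (i : Int) (r : Nat) (hr : r ≤ s.length)
    (hlo : ∀ m (hm : m < s.length), m < r → s[m] ≤ i)
    (hhi : ∀ m (hm : m < s.length), r ≤ m → i < s[m]) :
    s.countP (fun j => decide (j ≤ i)) = r := by
  have hsplit : s = s.take r ++ s.drop r := (List.take_append_drop r s).symm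
  rw [hsplit, List.countP_append]
  have h1 : (s.take r).countP (fun j => decide (j ≤ i)) = (s.take r).length := by
    apply List.countP_eq_length.mpr
    intro a ha
    obtain ⟨m, hm, rfl⟩ := List.mem_iff_getElem.mp ha
    have hmr : m < r := by simp only [List.length_take] at hm; omega
    have hm' : m < s.length := by simp only [List.length_take] at hm; omega
    rw [List.getElem_take]
    exact decide_eq_true (hlo m hm' hmr)
  have h2 : (s.drop r).countP (fun j => decide (j ≤ i)) = 0 := by
    apply List.countP_eq_zero.mpr
    intro a ha
    obtain ⟨m, hm, rfl⟩ := List.mem_iff_getElem.mp ha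
    rw [List.getElem_drop]
    have hm' : r + m < s.length := by simp [List.length_drop] at hm; omega
    simpa using not_le_of_gt (hhi (r + m) hm' (by omega))
  rw [h1, h2, List.length_take]
  omega

-- the core fact: for i ∈ ids, A's dict lookup equals B's count-rank index into the sorted salaries
lemma lookup_eq_rank (ids salary : List Int) (hlen : ids.length ≤ salary.length)
    (i : Int) (hi : i ∈ ids) :
    (((PySem.List.sorted ids (fun x => x) false).zip
        (PySem.List.sorted salary (fun x => x) false)).foldl
      (fun d p => d.insert p.1 p.2) PySem.Dict.empty).getD i 0 =
    PySem.List.pyGetD (PySem.List.sorted salary (fun x => x) false)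
      ((ids.countP (fun j => decide (j ≤ i)) : Int) - 1) 0 := by
  set s := PySem.List.sorted ids (fun x => x) false with hs
  set t := PySem.List.sorted salary (fun x => x) false with ht
  have hslen : s.length = ids.length := PySem.List.length_sorted ..
  have htlen : t.length = salary.length := PySem.List.length_sorted ..
  have hpw : s.Pairwise (fun a b => a ≤ b) := PySem.List.sorted_pairwise ids (fun x => x)
  obtain ⟨hr_le, hr_lo, hr_hi⟩ := PySem.List.bisectRight_spec s i hpw
  set r := PySem.List.bisectRight s i with hrdef
  -- ids.countP (≤ i) = s.countP (≤ i) = r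
  have hperm : s.Perm ids := PySem.List.sorted_perm ..
  have hcount : ids.countP (fun j => decide (j ≤ i)) = r := by
    rw [← hperm.countP_eq]
    exact countP_eq_of_prefix s i r hr_le hr_lo hr_hi
  rw [hcount]
  -- i occurs in s
  have his : i ∈ s := (PySem.List.mem_sorted ids (fun x => x) false i).mpr hi
  obtain ⟨k, hk, hke⟩ := List.mem_iff_getElem.mp his
  -- k < r, hence 1 ≤ r
  have hkr : k < r := by
    by_contra h
    exact absurd (hr_hi k hk (by omega)) (by rw [hke]; exact lt_irrefl i)
  have hr1 : 1 ≤ r := by omega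
  have hr1len : r - 1 < s.length := by omega
  -- s[r-1] = i
  have hsr : s[r - 1] = i := by
    have h1 : s[r - 1] ≤ i := hr_lo (r - 1) hr1len (by omega)
    have h2 : s[k]'hk ≤ s[r - 1] := PySem.List.sorted_id_getElem_mono ids (by omega) hr1len
    rw [hke] at h2
    omega
  -- zip facts
  have hzlen : (s.zip t).length = s.length := by
    rw [List.length_zip]; omega
  have hr1z : r - 1 < (s.zip t).length := by omega
  rw [foldl_insert_getD_last (s.zip t) _ i 0 (r - 1) hr1z
      (by rw [List.getElem_zip]; exact hsr)
      (fun m hm hlt => by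
        rw [List.getElem_zip]
        have hms : m < s.length := by omega
        have := hr_hi m hms (by omega)
        simp only
        omega)]
  rw [List.getElem_zip]
  -- B side: pyGetD t (r - 1) = t[r-1]
  have hcast : (r : Int) - 1 = ((r - 1 : Nat) : Int) := by omega
  rw [hcast, PySem.List.pyGetD_natCast]
  simp only
  rw [List.getD_eq_getElem t 0 (by omega)]

-- ===== VERDICT (by name: the statement is the Claim_ definition above) =====
theorem SynchronizingTables_spec : Claim_equal_SynchronizingTables := by
  intro N ids salary _hdom hpre
  unfold Spec_SynchronizingTables SynchronizingTables SynchronizingTables_alt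
  simp only
  rw [PySem.List.foldl_append_singleton_eq_map, PySem.List.foldl_append_singleton_eq_map]
  simp only [List.nil_append]
  refine List.map_congr_left (fun i hi => ?_)
  rw [PySem.List.foldl_ite_add_one]
  simpa using lookup_eq_rank ids salary hpre i hi
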